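-- pv_equiv track=rewrite | github.com/Adelin-BODNAR/Project_objective_function_RNA_folding_problem_M2_GENIOMHE_2024 | src/Training.py | get_reference_distances_distribution
-- ===== SOURCE A (Python) =====
-- def get_reference_distances_distribution(distances_distribution_by_pairs):
--
-- 	"""Function calculating the distances distribution across all pairs of nucleosides from a dictionary by pairs
--
-- 	Parameters
-- 	----------
-- 	distances_distribution_by_pairs
-- 		Dictionary containing the dictionaries of the distribution of distances for each pair of nucleosides
--
-- 	Returns
-- 	-------
-- 	reference_distances_distribution
-- 		 Dictionary containing the distances distribution across all pairs of nucleosides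
-- 	"""
--
-- 	reference_distances_distribution = dict()
-- 	for distrib in distances_distribution_by_pairs.values():
-- 		for d in distrib.keys():
-- 			reference_distances_distribution[d] = 0
-- 	for distribution in distances_distribution_by_pairs.values():
-- 		for distance, count in distribution.items():
-- 			reference_distances_distribution[distance] += count
-- 	return reference_distances_distribution
-- ===== SOURCE B (Python) =====
-- def get_reference_distances_distribution(distances_distribution_by_pairs):
-- 	"""Recursive group-by: flatten all (distance, count) items once, then
-- 	repeatedly take the first distance, total its counts, and recurse on the
-- 	items with that distance filtered out. No intermediate dict is mutated."""
-- 	items = [(d, c) for distrib in distances_distribution_by_pairs.values()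
-- 	         for d, c in distrib.items()]
--
-- 	def group(items):
-- 		if not items:
-- 			return []
-- 		d, c = items[0]
-- 		rest = items[1:]
-- 		total = c + sum(c2 for d2, c2 in rest if d2 == d)
-- 		return [(d, total)] + group([(d2, c2) for d2, c2 in rest if d2 != d])
--
-- 	return dict(group(items))
-- ===== Notes on version B (the rewrite author's own statement) =====
-- stated objective: alternative
-- what changed: Replaces A's two mutating dict passes (zero-init then accumulate) with a recursive group-by over the flattened item stream: take the first distance, sum its counts across the remaining items, filter it out and recurse; no dict is updated during the computation.
import Mathlib
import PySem

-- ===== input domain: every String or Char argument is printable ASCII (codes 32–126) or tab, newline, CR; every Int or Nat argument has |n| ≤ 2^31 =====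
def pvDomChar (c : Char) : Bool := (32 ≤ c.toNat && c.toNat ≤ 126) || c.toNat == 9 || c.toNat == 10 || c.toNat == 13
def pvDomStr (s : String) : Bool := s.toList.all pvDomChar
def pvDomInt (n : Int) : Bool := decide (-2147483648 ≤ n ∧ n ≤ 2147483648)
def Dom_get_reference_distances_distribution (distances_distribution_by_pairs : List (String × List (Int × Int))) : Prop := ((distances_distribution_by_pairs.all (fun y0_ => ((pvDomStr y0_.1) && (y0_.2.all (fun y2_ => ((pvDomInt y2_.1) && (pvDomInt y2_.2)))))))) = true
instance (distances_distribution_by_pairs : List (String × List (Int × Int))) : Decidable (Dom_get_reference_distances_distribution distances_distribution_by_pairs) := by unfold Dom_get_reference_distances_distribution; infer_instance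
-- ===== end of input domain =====

-- B replaces A's two mutating dict passes by a recursive group-by over the flattened item
-- stream: take the first distance, total its counts, filter it out and recurse (objective:
-- alternative decomposition, same results).


-- ===== PORT A =====
def get_reference_distances_distribution (distances_distribution_by_pairs : List (String × List (Int × Int))) : List (Int × Int) :=
  -- reference_distances_distribution = dict(); first loop zero-initialises every key
  let ref0 : PySem.Dict Int Int :=
    (distances_distribution_by_pairs.map Prod.snd).foldl
      (fun ref distrib =>
        (PySem.Dict.keys ⟨distrib⟩).foldl (fun ref d => ref.insert d 0) ref)
      PySem.Dict.empty
  -- second loop: reference_distances_distribution[distance] += count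
  let ref : PySem.Dict Int Int :=
    (distances_distribution_by_pairs.map Prod.snd).foldl
      (fun ref distribution =>
        (PySem.Dict.items ⟨distribution⟩).foldl
          (fun ref dc => ref.insert dc.1 (ref.getD dc.1 0 + dc.2)) ref)
      ref0
  ref.items

-- ===== PORT B =====
-- group(items): head distance, total of its counts over the rest, recurse on the rest
-- with that distance filtered out
def pvGroup : List (Int × Int) → List (Int × Int)
  | [] => []
  | (d, c) :: t =>
    (d, c + ((t.filter (fun p => p.1 == d)).map Prod.snd).sum) ::
      pvGroup (t.filter (fun p => p.1 != d))
termination_by L => L.length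
decreasing_by
  simp only [List.length_unattach, List.length_cons]
  exact Nat.lt_succ_of_le (le_trans (List.length_filter_le _ _) (by simp))

def get_reference_distances_distribution_alt (distances_distribution_by_pairs : List (String × List (Int × Int))) : List (Int × Int) :=
  -- items = [(d, c) for distrib in values() for d, c in distrib.items()]
  let items : List (Int × Int) :=
    (distances_distribution_by_pairs.map Prod.snd).flatMap
      (fun distrib => PySem.Dict.items ⟨distrib⟩)
  -- return dict(group(items))
  (PySem.Dict.ofList (pvGroup items)).items

-- ===== PRECONDITION & SPEC =====
-- A is total (no Pre_): the equivalence holds for every association-list input.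
def Spec_get_reference_distances_distribution (distances_distribution_by_pairs : List (String × List (Int × Int))) (out : List (Int × Int)) : Prop := out = get_reference_distances_distribution_alt distances_distribution_by_pairs
instance (distances_distribution_by_pairs : List (String × List (Int × Int))) (out : List (Int × Int)) : Decidable (Spec_get_reference_distances_distribution distances_distribution_by_pairs out) := by unfold Spec_get_reference_distances_distribution; infer_instance

-- ===== CLAIM (what is proved, stated in full; the proofs are below) =====
def Claim_equal_get_reference_distances_distribution : Prop := ∀ (distances_distribution_by_pairs : List (String × List (Int × Int))), Dom_get_reference_distances_distribution distances_distribution_by_pairs → Spec_get_reference_distances_distribution distances_distribution_by_pairs (get_reference_distances_distribution distances_distribution_by_pairs)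

-- ===== LEMMAS AND PROOFS =====

-- total count of distance d in an items list
def pvSumC (L : List (Int × Int)) (d : Int) : Int :=
  ((L.filter (fun p => p.1 == d)).map Prod.snd).sum

-- recursive first-occurrence dedup of a key stream
def pvRdedup : List Int → List Int
  | [] => []
  | d :: t => d :: pvRdedup (t.filter (fun x => x != d))
termination_by L => L.length
decreasing_by
  simp only [List.length_unattach, List.length_cons]
  exact Nat.lt_succ_of_le (le_trans (List.length_filter_le _ _) (by simp))

-- A's dedup-by-append step (what its zero-init pass does to the key order)
def pvStep (ks : List Int) (d : Int) : List Int := if d ∈ ks then ks else ks ++ [d]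

theorem foldl_flatMap {α β : Type} (g : β → α → β) (h : List (Int × Int) → List α)
    (l : List (List (Int × Int))) (init : β) :
    l.foldl (fun a xs => (h xs).foldl g a) init = (l.flatMap h).foldl g init := by
  induction l generalizing init with
  | nil => rfl
  | cons y t ih => simp [List.flatMap_cons, List.foldl_append, ih]

theorem pvRdedup_mem (S : List Int) (x : Int) : x ∈ pvRdedup S ↔ x ∈ S := by
  generalize hn : S.length = n
  induction n using Nat.strong_induction_on generalizing S with
  | _ n ih =>
    cases S with
    | nil => simp [pvRdedup]
    | cons d t =>
      have hlt : (t.filter (fun x => x != d)).length < n := by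
        subst hn
        simp only [List.length_cons]
        exact Nat.lt_succ_of_le (List.length_filter_le _ _)
      rw [pvRdedup]
      simp only [List.mem_cons, ih _ hlt _ rfl, List.mem_filter, bne_iff_ne]
      by_cases h : x = d <;> simp [h]

theorem pvRdedup_nodup (S : List Int) : (pvRdedup S).Nodup := by
  generalize hn : S.length = n
  induction n using Nat.strong_induction_on generalizing S with
  | _ n ih =>
    cases S with
    | nil => simp [pvRdedup]
    | cons d t =>
      have hlt : (t.filter (fun x => x != d)).length < n := by
        subst hn
        simp only [List.length_cons]
        exact Nat.lt_succ_of_le (List.length_filter_le _ _)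
      rw [pvRdedup, List.nodup_cons]
      refine ⟨fun h => ?_, ih _ hlt _ rfl⟩
      have := (List.mem_filter.mp ((pvRdedup_mem _ _).mp h)).2
      simp at this

-- A's append-dedup fold equals the recursive dedup of the not-yet-seen keys
theorem pvFoldStep_eq (S : List Int) (ks : List Int) :
    S.foldl pvStep ks = ks ++ pvRdedup (S.filter (fun x => decide (x ∉ ks))) := by
  induction S generalizing ks with
  | nil => simp [pvRdedup]
  | cons d t ih =>
    simp only [List.foldl_cons, pvStep, List.filter_cons]
    by_cases h : d ∈ ks
    · rw [if_pos h, show (decide (d ∉ ks)) = false by simp [h]]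
      simp only [Bool.false_eq_true, if_false]
      exact ih ks
    · rw [if_neg h, show (decide (d ∉ ks)) = true by simp [h]]
      simp only [if_true]
      rw [ih (ks ++ [d]), pvRdedup, List.filter_filter]
      have hpred : (fun x => (x != d) && decide (x ∉ ks)) = (fun x => decide (x ∉ ks ++ [d])) := by
        funext x
        by_cases hx : x = d <;> simp [hx, h]
      rw [hpred, List.append_assoc]
      rfl

theorem pvSumC_cons (p : Int × Int) (L : List (Int × Int)) (d : Int) :
    pvSumC (p :: L) d = (if p.1 = d then p.2 else 0) + pvSumC L d := by
  by_cases h : p.1 = d <;> simp [pvSumC, h]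

-- filtering out another distance does not change a distance's total
theorem pvSumC_filter_ne (L : List (Int × Int)) (d k : Int) (h : k ≠ d) :
    pvSumC (L.filter (fun p => p.1 != d)) k = pvSumC L k := by
  unfold pvSumC
  rw [List.filter_filter,
      List.filter_congr (l := L) (q := fun p => p.1 == k)
        (fun p _ => by by_cases hp : p.1 = k <;> simp [hp, h])]

-- B's recursive group-by computes, per first-occurrence key, the total over the whole list
theorem pvGroup_eq (L : List (Int × Int)) :
    pvGroup L = (pvRdedup (L.map Prod.fst)).map (fun k => (k, pvSumC L k)) := by
  generalize hn : L.length = n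
  induction n using Nat.strong_induction_on generalizing L with
  | _ n ih =>
    cases L with
    | nil => simp [pvGroup, pvRdedup]
    | cons p t =>
      obtain ⟨d, c⟩ := p
      have hlt : (t.filter (fun p => p.1 != d)).length < n := by
        subst hn
        simp only [List.length_cons]
        exact Nat.lt_succ_of_le (List.length_filter_le _ _)
      rw [pvGroup, List.map_cons, pvRdedup, List.map_cons, ih _ hlt _ rfl]
      have hmapf : (t.map Prod.fst).filter (fun x => x != d)
          = (t.filter (fun p => p.1 != d)).map Prod.fst := by
        rw [List.filter_map]; rfl
      refine congrArg₂ List.cons ?_ ?_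
      · simp [pvSumC]
      · rw [hmapf]
        refine List.map_congr_left (fun k hk => ?_)
        have hk' : k ≠ d := by
          have := (pvRdedup_mem _ _).mp hk
          rw [← hmapf] at this
          simpa using (List.mem_filter.mp this).2
        rw [pvSumC_filter_ne t d k hk', pvSumC_cons]
        simp [Ne.symm hk']

-- ===== A-side lemmas (insert/getD on an explicitly mapped dict) =====

theorem pvContains_map (ks : List Int) (f : Int → Int) (d : Int) :
    (PySem.Dict.contains ⟨ks.map (fun k => (k, f k))⟩ d) = decide (d ∈ ks) := by
  simp [PySem.Dict.contains, List.any_map, Function.comp_def, List.any_beq']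

theorem pvInsert_map_mem (ks : List Int) (f : Int → Int) (d v : Int) (hd : d ∈ ks) :
    (PySem.Dict.insert ⟨ks.map (fun k => (k, f k))⟩ d v : PySem.Dict Int Int)
      = ⟨ks.map (fun k => (k, if k = d then v else f k))⟩ := by
  simp only [PySem.Dict.insert, pvContains_map, hd, decide_true, if_true]
  congr 1
  rw [List.map_map]
  refine List.map_congr_left (fun k _ => ?_)
  by_cases h : k = d
  · subst h; simp
  · simp [h]

theorem pvInsert_map_not_mem (ks : List Int) (f : Int → Int) (d v : Int) (hd : d ∉ ks) :
    (PySem.Dict.insert ⟨ks.map (fun k => (k, f k))⟩ d v : PySem.Dict Int Int)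
      = ⟨ks.map (fun k => (k, f k)) ++ [(d, v)]⟩ := by
  simp [PySem.Dict.insert, hd]

-- A's first pass over a key stream, from a zero dict
theorem pvZeroPass (L : List Int) (ks : List Int) :
    L.foldl (fun (ref : PySem.Dict Int Int) d => ref.insert d 0)
        ⟨ks.map (fun k => (k, 0))⟩
      = ⟨(L.foldl pvStep ks).map (fun k => (k, 0))⟩ := by
  induction L generalizing ks with
  | nil => rfl
  | cons d t ih =>
    simp only [List.foldl_cons, pvStep]
    split_ifs with h
    · rw [pvInsert_map_mem ks _ d 0 h]
      simpa using ih ks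
    · rw [pvInsert_map_not_mem ks _ d 0 h, show (ks.map (fun k => ((k:Int), (0:Int))) ++ [(d, 0)]) = (ks ++ [d]).map (fun k => (k, 0)) by simp]
      exact ih (ks ++ [d])

theorem pvGetD_map (ks : List Int) (f : Int → Int) (d : Int) (hd : d ∈ ks) :
    PySem.Dict.getD ⟨ks.map (fun k => (k, f k))⟩ d 0 = f d := by
  induction ks with
  | nil => simp at hd
  | cons a t ih =>
    by_cases h : a = d
    · subst h; simp [PySem.Dict.getD, PySem.Dict.get?]
    · rcases List.mem_cons.mp hd with rfl | hd'
      · exact absurd rfl h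
      · simpa [PySem.Dict.getD, PySem.Dict.get?, List.find?_cons, h] using ih hd'

-- A's accumulation pass
theorem pvAccPass (L : List (Int × Int)) (ks : List Int) (f : Int → Int)
    (hm : ∀ p ∈ L, p.1 ∈ ks) :
    L.foldl (fun (ref : PySem.Dict Int Int) dc => ref.insert dc.1 (ref.getD dc.1 0 + dc.2))
        ⟨ks.map (fun k => (k, f k))⟩
      = ⟨ks.map (fun k => (k, f k + pvSumC L k))⟩ := by
  induction L generalizing f with
  | nil => simp [pvSumC]
  | cons dc t ih =>
    have hd : dc.1 ∈ ks := hm dc (List.mem_cons_self ..)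
    simp only [List.foldl_cons]
    rw [pvGetD_map ks f dc.1 hd, pvInsert_map_mem ks f dc.1 _ hd,
        ih (fun k => if k = dc.1 then f dc.1 + dc.2 else f k) (fun p hp => hm p (List.mem_cons_of_mem _ hp))]
    congr 1
    refine List.map_congr_left (fun k _ => ?_)
    rw [pvSumC_cons]
    by_cases h : k = dc.1
    · subst h; norm_num; omega
    · have h2 : dc.1 ≠ k := fun he => h he.symm
      simp [h, h2]

-- dict(pairs) with distinct keys keeps exactly those pairs as its items
theorem pvItems_ofList (L : List (Int × Int)) (h : (L.map Prod.fst).Nodup) :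
    (PySem.Dict.ofList L : PySem.Dict Int Int).items = L := by
  have := PySem.Dict.items_foldl_insert_fresh L Prod.fst Prod.snd
    (PySem.Dict.empty : PySem.Dict Int Int) (fun a _ => rfl) h
  simpa [PySem.Dict.ofList] using this

-- ===== VERDICT (by name: the statement is the Claim_ definition above) =====
theorem get_reference_distances_distribution_spec : Claim_equal_get_reference_distances_distribution := by
  intro xs _
  unfold Spec_get_reference_distances_distribution
  unfold get_reference_distances_distribution get_reference_distances_distribution_alt
  simp only [PySem.Dict.keys]
  set V : List (List (Int × Int)) := xs.map Prod.snd with hV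
  -- flatten A's two pairs of nested folds
  rw [foldl_flatMap (fun (ref : PySem.Dict Int Int) d => ref.insert d 0) (fun l => l.map Prod.fst) V,
      foldl_flatMap (fun (ref : PySem.Dict Int Int) dc => ref.insert dc.1 (ref.getD dc.1 0 + dc.2)) (fun l => l) V]
  set F : List (Int × Int) := V.flatMap (fun l => l) with hF
  have hS : V.flatMap (fun l => l.map Prod.fst) = F.map Prod.fst := by
    rw [hF, List.map_flatMap]
  -- A's side: zero-init then accumulate over the flattened stream
  have hA1 : (PySem.Dict.empty : PySem.Dict Int Int) = ⟨([] : List Int).map (fun k => (k, 0))⟩ := rfl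
  rw [hA1, hS, pvZeroPass (F.map Prod.fst) []]
  have hK : (F.map Prod.fst).foldl pvStep [] = pvRdedup (F.map Prod.fst) := by
    rw [pvFoldStep_eq]
    simp
  rw [hK, pvAccPass F (pvRdedup (F.map Prod.fst)) (fun _ => 0)
      (fun p hp => (pvRdedup_mem _ _).mpr (List.mem_map.mpr ⟨p, hp, rfl⟩))]
  -- B's side: recursive group-by, then dict() keeps the pairs
  have hnd : ((pvGroup F).map Prod.fst).Nodup := by
    rw [pvGroup_eq, List.map_map]
    have : (Prod.fst ∘ fun k => ((k : Int), pvSumC F k)) = id := rfl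
    rw [this, List.map_id]
    exact pvRdedup_nodup (F.map Prod.fst)
  have hB : (PySem.Dict.ofList (pvGroup (V.flatMap (fun distrib => distrib)))).items = pvGroup F := by
    rw [show V.flatMap (fun distrib => distrib) = F from rfl]
    exact pvItems_ofList _ hnd
  rw [hB, pvGroup_eq]
  simp
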